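-- pv_equiv track=rewrite | github.com/Corgidev42/Mnemos | quiz_rappel_gui.py | _build_flashcard_tuples
-- ===== SOURCE A (Python) =====
-- def _build_flashcard_tuples(pairs, sens):
--     """Liste (mode, nombre, mot) pour les cartes, selon la direction."""
--     out = []
--     for nombre, mot in pairs:
--         if sens in ("1", "3"):
--             out.append(("nombre->mot", nombre, mot))
--         if sens in ("2", "3"):
--             out.append(("mot->nombre", nombre, mot))
--     return out
-- ===== SOURCE B (Python) =====
-- def _build_flashcard_tuples(pairs, sens):
--     """Liste (mode, nombre, mot) pour les cartes, selon la direction."""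
--     fwd = [("nombre->mot", nombre, mot) for nombre, mot in pairs]
--     bwd = [("mot->nombre", nombre, mot) for nombre, mot in pairs]
--     if sens == "1":
--         return fwd
--     if sens == "2":
--         return bwd
--     if sens == "3":
--         return [card for duo in zip(fwd, bwd) for card in duo]
--     return []
-- ===== Notes on version B (the rewrite author's own statement) =====
-- stated objective: alternative
-- what changed: Instead of one pass with per-pair direction conditionals, B builds the complete forward and backward decks in two separate map passes and then selects one deck or zip-interleaves the two for sens '3' (empty for unknown sens).
import Mathlib
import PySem

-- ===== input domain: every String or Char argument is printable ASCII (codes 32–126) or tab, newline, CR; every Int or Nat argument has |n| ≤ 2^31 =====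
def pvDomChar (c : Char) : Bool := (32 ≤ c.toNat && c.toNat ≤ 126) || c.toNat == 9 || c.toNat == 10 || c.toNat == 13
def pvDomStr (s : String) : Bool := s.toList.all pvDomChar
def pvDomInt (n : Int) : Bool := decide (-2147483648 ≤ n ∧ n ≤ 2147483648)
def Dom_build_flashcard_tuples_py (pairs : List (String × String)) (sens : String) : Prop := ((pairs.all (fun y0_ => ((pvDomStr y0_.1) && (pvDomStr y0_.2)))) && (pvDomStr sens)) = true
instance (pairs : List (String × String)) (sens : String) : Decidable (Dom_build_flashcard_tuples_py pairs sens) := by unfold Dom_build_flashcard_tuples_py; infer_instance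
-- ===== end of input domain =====

-- B builds the full forward and backward decks in two staged passes and selects/zip-interleaves them per direction (alternative decomposition, same cost).
-- ===== PORT A =====
def build_flashcard_tuples_py (pairs : List (String × String)) (sens : String) : List (String × String × String) :=
  pairs.foldl (fun out p =>
    let out := if sens = "1" ∨ sens = "3" then out ++ [("nombre->mot", p.1, p.2)] else out
    if sens = "2" ∨ sens = "3" then out ++ [("mot->nombre", p.1, p.2)] else out) []

-- ===== PORT B =====
def build_flashcard_tuples_py_alt (pairs : List (String × String)) (sens : String) : List (String × String × String) :=
  let fwd := pairs.map (fun p => ("nombre->mot", p.1, p.2))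
  let bwd := pairs.map (fun p => ("mot->nombre", p.1, p.2))
  if sens = "1" then fwd
  else if sens = "2" then bwd
  else if sens = "3" then (fwd.zip bwd).flatMap (fun duo => [duo.1, duo.2])
  else []

-- ===== PRECONDITION & SPEC =====
def Spec_build_flashcard_tuples_py (pairs : List (String × String)) (sens : String) (out : List (String × String × String)) : Prop := out = build_flashcard_tuples_py_alt pairs sens
instance (pairs : List (String × String)) (sens : String) (out : List (String × String × String)) : Decidable (Spec_build_flashcard_tuples_py pairs sens out) := by unfold Spec_build_flashcard_tuples_py; infer_instance

-- ===== CLAIM (what is proved, stated in full; the proofs are below) =====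
def Claim_equal_build_flashcard_tuples_py : Prop := ∀ (pairs : List (String × String)) (sens : String), Dom_build_flashcard_tuples_py pairs sens → Spec_build_flashcard_tuples_py pairs sens (build_flashcard_tuples_py pairs sens)

-- ===== LEMMAS AND PROOFS =====
-- A's loop appends, per pair, the block of tuples selected by sens.
theorem flashcard_step (pairs : List (String × String)) (sens : String) (acc : List (String × String × String)) :
    pairs.foldl (fun out p =>
      let out := if sens = "1" ∨ sens = "3" then out ++ [("nombre->mot", p.1, p.2)] else out
      if sens = "2" ∨ sens = "3" then out ++ [("mot->nombre", p.1, p.2)] else out) acc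
    = acc ++ pairs.flatMap (fun p =>
        (if sens = "1" ∨ sens = "3" then [("nombre->mot", p.1, p.2)] else [])
        ++ (if sens = "2" ∨ sens = "3" then [("mot->nombre", p.1, p.2)] else [])) := by
  induction pairs generalizing acc with
  | nil => simp
  | cons p rest ih =>
    simp only [List.foldl, List.flatMap_cons, ih]
    split_ifs <;> simp

-- Zipping the two map passes and flattening pairs gives the per-pair interleaving.
theorem zip_interleave (pairs : List (String × String)) :
    ((pairs.map (fun p => (("nombre->mot" : String), p.1, p.2))).zip
      (pairs.map (fun p => (("mot->nombre" : String), p.1, p.2)))).flatMap (fun duo => [duo.1, duo.2])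
    = pairs.flatMap (fun p => [("nombre->mot", p.1, p.2), ("mot->nombre", p.1, p.2)]) := by
  induction pairs with
  | nil => rfl
  | cons p rest ih => simp [ih]

-- ===== VERDICT (by name: the statement is the Claim_ definition above) =====
theorem build_flashcard_tuples_py_spec : Claim_equal_build_flashcard_tuples_py := by
  intro pairs sens hdom
  clear hdom
  show build_flashcard_tuples_py pairs sens = build_flashcard_tuples_py_alt pairs sens
  rw [build_flashcard_tuples_py, flashcard_step]
  by_cases h1 : sens = "1"
  · simp [build_flashcard_tuples_py_alt, h1]
    induction pairs with
    | nil => rfl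
    | cons p rest ih => simpa using ih
  · by_cases h2 : sens = "2"
    · simp [build_flashcard_tuples_py_alt, h2]
      induction pairs with
      | nil => rfl
      | cons p rest ih => simpa using ih
    · by_cases h3 : sens = "3"
      · simp only [build_flashcard_tuples_py_alt, h3]
        simp only [zip_interleave]
        simp
      · simp [build_flashcard_tuples_py_alt, h1, h2, h3]
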